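-- pv_equiv track=rewrite | github.com/ANKITKUMARBARIK/AI_ML-FullStack | 04_loops/put_of_order.py | scan_parcels
-- ===== SOURCE A (Python) =====
-- def scan_parcels(parcel_codes: list[str]) -> list[str]:
--     # Write your code below this line
--     new_lists = []
--
--     for barcode in parcel_codes:
--         if barcode == "DAMAGED":
--             new_lists.append(f"Skipped damaged parcel")
--             continue
--         if barcode == "STOP":
--             new_lists.append(f"Critical error: Stopping scan")
--             break
--         new_lists.append(f"Scanned parcel: {barcode}")
--     else:
--         new_lists.append(f"All parcels scanned successfully")
--
--     return new_lists
-- ===== SOURCE B (Python) =====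
-- def scan_parcels(parcel_codes: list[str]) -> list[str]:
--     # Build the answer back-to-front: walk the barcodes in reverse keeping the
--     # (reversed) result for the suffix seen so far; a STOP discards that suffix
--     # result and restarts it as just the error line.
--     out_rev = ["All parcels scanned successfully"]
--     for barcode in reversed(parcel_codes):
--         if barcode == "STOP":
--             out_rev = ["Critical error: Stopping scan"]
--         elif barcode == "DAMAGED":
--             out_rev.append("Skipped damaged parcel")
--         else:
--             out_rev.append(f"Scanned parcel: {barcode}")
--     return out_rev[::-1]
-- ===== Notes on version B (the rewrite author's own statement) =====
-- stated objective: alternative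
-- what changed: Builds the output back-to-front: a reverse traversal keeps the reversed result of the suffix processed so far, a STOP resets it to just the error line (the for-else/break bookkeeping disappears), and one final reversal yields the answer; same O(n) cost, trades the forward early-exit loop for a reverse fold.
import Mathlib
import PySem

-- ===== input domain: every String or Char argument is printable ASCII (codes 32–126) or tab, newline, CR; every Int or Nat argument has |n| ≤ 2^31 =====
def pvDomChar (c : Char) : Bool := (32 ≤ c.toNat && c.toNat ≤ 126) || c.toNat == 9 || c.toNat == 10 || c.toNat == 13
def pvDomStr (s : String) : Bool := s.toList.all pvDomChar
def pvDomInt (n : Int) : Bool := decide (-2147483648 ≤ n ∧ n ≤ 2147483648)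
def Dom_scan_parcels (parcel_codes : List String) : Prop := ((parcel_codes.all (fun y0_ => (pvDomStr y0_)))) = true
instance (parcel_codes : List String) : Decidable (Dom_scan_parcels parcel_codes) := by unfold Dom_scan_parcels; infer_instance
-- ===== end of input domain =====

-- B builds the output back-to-front by a reverse traversal that resets on STOP, instead of A's forward break/continue/for-else loop (objective: alternative).
-- ===== PORT A =====
-- A's for-loop with break/continue and for-else: recursion over the remaining list carrying the accumulator new_lists
def scan_parcels_loop (acc : List String) : List String → List String
  | [] => acc ++ ["All parcels scanned successfully"]
  | barcode :: rest =>
    if barcode == "DAMAGED" then scan_parcels_loop (acc ++ ["Skipped damaged parcel"]) rest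
    else if barcode == "STOP" then acc ++ ["Critical error: Stopping scan"]
    else scan_parcels_loop (acc ++ ["Scanned parcel: " ++ barcode]) rest

def scan_parcels (parcel_codes : List String) : List String :=
  scan_parcels_loop [] parcel_codes

-- ===== PORT B =====
-- Source B's loop body: out_rev holds the reversed result for the suffix already traversed
def scan_parcels_step (out_rev : List String) (barcode : String) : List String :=
  if barcode == "STOP" then ["Critical error: Stopping scan"]
  else if barcode == "DAMAGED" then out_rev ++ ["Skipped damaged parcel"]
  else out_rev ++ ["Scanned parcel: " ++ barcode]

def scan_parcels_alt (parcel_codes : List String) : List String :=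
  (parcel_codes.reverse.foldl scan_parcels_step ["All parcels scanned successfully"]).reverse

-- ===== PRECONDITION & SPEC =====
def Spec_scan_parcels (parcel_codes : List String) (out : List String) : Prop := out = scan_parcels_alt parcel_codes
instance (parcel_codes : List String) (out : List String) : Decidable (Spec_scan_parcels parcel_codes out) := by unfold Spec_scan_parcels; infer_instance

-- ===== CLAIM (what is proved, stated in full; the proofs are below) =====
def Claim_equal_scan_parcels : Prop := ∀ (parcel_codes : List String), Dom_scan_parcels parcel_codes → Spec_scan_parcels parcel_codes (scan_parcels parcel_codes)

-- ===== LEMMAS AND PROOFS =====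
-- B's fold over the reversed list, rewritten as a right fold over the original list
theorem scan_parcels_alt_foldr (parcel_codes : List String) :
    scan_parcels_alt parcel_codes =
      (parcel_codes.foldr (fun b r => scan_parcels_step r b) ["All parcels scanned successfully"]).reverse := by
  simp [scan_parcels_alt, List.foldl_reverse]

-- A's loop with accumulator acc produces acc ++ (B's result)
theorem scan_parcels_loop_eq (parcel_codes : List String) (acc : List String) :
    scan_parcels_loop acc parcel_codes = acc ++ scan_parcels_alt parcel_codes := by
  induction parcel_codes generalizing acc with
  | nil => simp [scan_parcels_loop, scan_parcels_alt]
  | cons b rest ih =>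
    rw [scan_parcels_alt_foldr] at ih ⊢
    by_cases hd : b = "DAMAGED"
    · subst hd
      rw [scan_parcels_loop]
      simp [ih, List.foldr_cons, scan_parcels_step]
    · by_cases hs : b = "STOP"
      · subst hs
        rw [scan_parcels_loop]
        simp [List.foldr_cons, scan_parcels_step]
      · rw [scan_parcels_loop]
        simp [hd, hs, ih, List.foldr_cons, scan_parcels_step]

-- ===== VERDICT (by name: the statement is the Claim_ definition above) =====
theorem scan_parcels_spec : Claim_equal_scan_parcels := by
  intro pcs _
  unfold Spec_scan_parcels scan_parcels
  simpa using scan_parcels_loop_eq pcs []
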